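-- pv_equiv track=rewrite | github.com/lordzizzy/leet_code | 04_daily_challenge/2021/05-may/week1/del_op_for_2_strings.py | minDistance_2d_dp_LCS
-- ===== SOURCE A (Python) =====
-- from itertools import product
--
-- def minDistance_2d_dp_LCS(word1: str, word2: str) -> int:
--     m, n = len(word1), len(word2)
--     dp = [[0] * (n + 1) for _ in range(m + 1)]
--     for i, j in product(range(m), range(n)):
--         dp[i + 1][j + 1] = max(
--             dp[i][j + 1], dp[i + 1][j], dp[i][j] + int(word1[i] == word2[j])
--         )
--     return m + n - (2 * dp[m][n])
-- ===== SOURCE B (Python) =====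
-- def minDistance_2d_dp_LCS(word1: str, word2: str) -> int:
--     # Deletion distance computed directly, one rolling row (no LCS conversion).
--     n = len(word2)
--     prev = list(range(n + 1))
--     for i in range(len(word1)):
--         cur = [i + 1]
--         for j in range(n):
--             cur.append(prev[j] if word1[i] == word2[j] else 1 + min(prev[j + 1], cur[j]))
--         prev = cur
--     return prev[n]
-- ===== Notes on version B (the rewrite author's own statement) =====
-- stated objective: alternative
-- what changed: B computes the deletion distance directly with a single rolling DP row (dp[i][j]=i or j on the borders, carry on match, 1+min of neighbours otherwise), instead of A's full (m+1)x(n+1) LCS table over itertools.product followed by the m+n-2*LCS conversion.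
import Mathlib
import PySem

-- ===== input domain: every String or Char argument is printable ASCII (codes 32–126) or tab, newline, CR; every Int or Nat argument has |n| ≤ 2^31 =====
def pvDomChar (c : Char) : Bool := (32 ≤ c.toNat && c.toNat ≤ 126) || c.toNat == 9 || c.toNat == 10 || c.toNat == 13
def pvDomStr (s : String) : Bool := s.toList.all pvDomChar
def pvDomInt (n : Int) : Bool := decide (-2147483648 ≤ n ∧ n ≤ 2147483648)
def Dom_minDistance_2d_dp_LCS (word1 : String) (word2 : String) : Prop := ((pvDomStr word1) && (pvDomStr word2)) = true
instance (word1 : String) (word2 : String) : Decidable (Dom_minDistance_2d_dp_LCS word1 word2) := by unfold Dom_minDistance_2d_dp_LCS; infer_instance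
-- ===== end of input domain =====

-- B replaces A's full LCS table + m+n-2*LCS conversion by a direct one-row deletion-distance DP (alternative decomposition; return value only, no side effects involved).

-- ===== PORT A =====
-- dp[i][j] access; all accesses in A are in range, so getD is exact
def pvGet2 (dp : List (List Int)) (i j : Nat) : Int := (dp.getD i []).getD j 0

-- the body of A's product loop: dp[i+1][j+1] = max(dp[i][j+1], dp[i+1][j], dp[i][j] + int(word1[i]==word2[j]))
def pvStepA (w1 w2 : List Char) (dp : List (List Int)) (ij : Nat × Nat) : List (List Int) :=
  let v := max (pvGet2 dp ij.1 (ij.2+1)) (max (pvGet2 dp (ij.1+1) ij.2)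
      (pvGet2 dp ij.1 ij.2 + (if w1.getD ij.1 ' ' = w2.getD ij.2 ' ' then (1:Int) else 0)))
  dp.set (ij.1+1) ((dp.getD (ij.1+1) []).set (ij.2+1) v)

def minDistance_2d_dp_LCS (word1 : String) (word2 : String) : Int :=
  let w1 := word1.toList
  let w2 := word2.toList
  let m := w1.length
  let n := w2.length
  let dp0 := List.replicate (m+1) (List.replicate (n+1) (0:Int))
  -- itertools.product(range(m), range(n)) in row-major order
  let pairs := (List.range m).flatMap (fun i => (List.range n).map (fun j => (i, j)))
  let dp := pairs.foldl (pvStepA w1 w2) dp0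
  (m : Int) + (n : Int) - 2 * pvGet2 dp m n

-- ===== PORT B =====
-- inner loop body of B: cur.append(prev[j] if word1[i]==word2[j] else 1 + min(prev[j+1], cur[j]))
def pvInnerB (w1 w2 : List Char) (i : Nat) (prev : List Int) (cur : List Int) (j : Nat) : List Int :=
  cur ++ [if w1.getD i ' ' = w2.getD j ' ' then prev.getD j 0
          else 1 + min (prev.getD (j+1) 0) (cur.getD j 0)]

-- outer loop body of B: cur = [i+1]; inner loop; prev = cur
def pvOuterB (w1 w2 : List Char) (n : Nat) (prev : List Int) (i : Nat) : List Int :=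
  (List.range n).foldl (pvInnerB w1 w2 i prev) [((i : Int) + 1)]

def minDistance_2d_dp_LCS_alt (word1 : String) (word2 : String) : Int :=
  let w1 := word1.toList
  let w2 := word2.toList
  let n := w2.length
  let prev0 := (List.range (n+1)).map (fun (j : Nat) => (j : Int))   -- list(range(n+1))
  let prev := (List.range w1.length).foldl (pvOuterB w1 w2 n) prev0
  prev.getD n 0

-- ===== PRECONDITION & SPEC =====
def Spec_minDistance_2d_dp_LCS (word1 : String) (word2 : String) (out : Int) : Prop := out = minDistance_2d_dp_LCS_alt word1 word2
instance (word1 : String) (word2 : String) (out : Int) : Decidable (Spec_minDistance_2d_dp_LCS word1 word2 out) := by unfold Spec_minDistance_2d_dp_LCS; infer_instance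

-- ===== CLAIM (what is proved, stated in full; the proofs are below) =====
def Claim_equal_minDistance_2d_dp_LCS : Prop := ∀ (word1 : String) (word2 : String), Dom_minDistance_2d_dp_LCS word1 word2 → Spec_minDistance_2d_dp_LCS word1 word2 (minDistance_2d_dp_LCS word1 word2)

-- ===== LEMMAS AND PROOFS =====

-- the common DP value: pvL w1 w2 i j = LCS length of the length-i and length-j prefixes, as A's recurrence computes it
def pvL (w1 w2 : List Char) : Nat → Nat → Int
  | 0, _ => 0
  | _+1, 0 => 0
  | i+1, j+1 => max (pvL w1 w2 i (j+1)) (max (pvL w1 w2 (i+1) j)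
      (pvL w1 w2 i j + (if w1.getD i ' ' = w2.getD j ' ' then (1:Int) else 0)))
termination_by i j => (i, j)

-- B's DP value: deletion distance on prefixes
def pvM (w1 w2 : List Char) (i j : Nat) : Int := (i : Int) + (j : Int) - 2 * pvL w1 w2 i j

theorem pvL_zero_right (w1 w2 : List Char) (i : Nat) : pvL w1 w2 i 0 = 0 := by
  cases i <;> rw [pvL]

theorem pvL_mono_i (w1 w2 : List Char) (i j : Nat) : pvL w1 w2 i j ≤ pvL w1 w2 (i+1) j := by
  cases j with
  | zero => simp [pvL_zero_right]
  | succ j => rw [pvL]; exact le_max_left _ _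

theorem pvL_mono_j (w1 w2 : List Char) (i j : Nat) : pvL w1 w2 i j ≤ pvL w1 w2 i (j+1) := by
  cases i with
  | zero => rw [pvL, pvL]
  | succ i => rw [pvL]; exact le_trans (le_max_left _ _) (le_max_right _ _)

theorem pvL_step_j (w1 w2 : List Char) (i j : Nat) : pvL w1 w2 i (j+1) ≤ pvL w1 w2 i j + 1 := by
  induction i with
  | zero => rw [pvL, pvL]; omega
  | succ i ih =>
    rw [pvL]
    have hm := pvL_mono_i w1 w2 i j
    have h3 : pvL w1 w2 i j + (if w1.getD i ' ' = w2.getD j ' ' then (1:Int) else 0)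
        ≤ pvL w1 w2 (i+1) j + 1 := by split <;> omega
    exact max_le (by omega) (max_le (by omega) h3)

theorem pvL_step_i (w1 w2 : List Char) (i j : Nat) : pvL w1 w2 (i+1) j ≤ pvL w1 w2 i j + 1 := by
  induction j with
  | zero => simp [pvL_zero_right]
  | succ j ih =>
    rw [pvL]
    have hm := pvL_mono_j w1 w2 i j
    have h3 : pvL w1 w2 i j + (if w1.getD i ' ' = w2.getD j ' ' then (1:Int) else 0)
        ≤ pvL w1 w2 i (j+1) + 1 := by split <;> omega
    exact max_le (by omega) (max_le (by omega) h3)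

theorem pvL_succ_succ (w1 w2 : List Char) (i j : Nat) :
    pvL w1 w2 (i+1) (j+1) = max (pvL w1 w2 i (j+1)) (max (pvL w1 w2 (i+1) j)
      (pvL w1 w2 i j + (if w1.getD i ' ' = w2.getD j ' ' then (1:Int) else 0))) := by
  rw [pvL]

theorem pvL_eq_case (w1 w2 : List Char) (i j : Nat) (h : w1.getD i ' ' = w2.getD j ' ') :
    pvL w1 w2 (i+1) (j+1) = pvL w1 w2 i j + 1 := by
  rw [pvL_succ_succ, if_pos h]
  have h1 := pvL_step_j w1 w2 i j
  have h2 := pvL_step_i w1 w2 i j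
  rw [max_eq_right (by omega), max_eq_right (by omega)]

theorem pvL_neq_case (w1 w2 : List Char) (i j : Nat) (h : ¬ w1.getD i ' ' = w2.getD j ' ') :
    pvL w1 w2 (i+1) (j+1) = max (pvL w1 w2 i (j+1)) (pvL w1 w2 (i+1) j) := by
  rw [pvL_succ_succ, if_neg h, add_zero]
  rw [max_eq_left (pvL_mono_i w1 w2 i j)]

-- B's recurrence, derived from A's
theorem pvM_rec (w1 w2 : List Char) (i j : Nat) :
    pvM w1 w2 (i+1) (j+1) = if w1.getD i ' ' = w2.getD j ' ' then pvM w1 w2 i j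
      else 1 + min (pvM w1 w2 i (j+1)) (pvM w1 w2 (i+1) j) := by
  unfold pvM
  split
  · rw [pvL_eq_case w1 w2 i j ‹_›]; push_cast; ring
  · rw [pvL_neq_case w1 w2 i j ‹_›]
    rcases le_total (pvL w1 w2 i (j+1)) (pvL w1 w2 (i+1) j) with h'|h'
    · rw [max_eq_right h', min_eq_right (by push_cast; omega)]; push_cast; ring
    · rw [max_eq_left h', min_eq_left (by push_cast; omega)]; push_cast; ring

theorem pvM_zero (w1 w2 : List Char) (i : Nat) : pvM w1 w2 i 0 = (i : Int) := by
  simp [pvM, pvL_zero_right]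

theorem pvM_zero_left (w1 w2 : List Char) (j : Nat) : pvM w1 w2 0 j = (j : Int) := by
  simp [pvM, pvL]

-- generic list lemmas for the map-over-range representation
theorem pvGetD_map_range {α : Type} (k i : Nat) (f : Nat → α) (d : α) :
    ((List.range k).map f).getD i d = if i < k then f i else d := by
  rcases Nat.lt_or_ge i k with h|h
  · rw [List.getD_eq_getElem?_getD]; simp [h]
  · rw [List.getD_eq_getElem?_getD, List.getElem?_eq_none (by simpa using h)]
    simp; omega

theorem pvSet_map_range {α : Type} (k i : Nat) (f : Nat → α) (v : α) (h : i < k) :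
    ((List.range k).map f).set i v = (List.range k).map (fun x => if x = i then v else f x) := by
  apply List.ext_getElem
  · simp
  · intro j hj hj'
    by_cases hji : j = i <;> simp [hji, List.getElem_set]
    intro h'; exact absurd h'.symm hji

theorem pvMap_range_congr {α : Type} {k : Nat} {f g : Nat → α} (h : ∀ x, x < k → f x = g x) :
    (List.range k).map f = (List.range k).map g := by
  apply List.map_congr_left; intro x hx; exact h x (List.mem_range.mp hx)

theorem pvRep {α : Type} (k : Nat) (x : α) :
    (List.range k).map (fun _ => x) = List.replicate k x := by
  simp [List.map_const']

-- A's intermediate tables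
def pvTab (w1 w2 : List Char) (n m k : Nat) : List (List Int) :=
  (List.range (m+1)).map (fun r =>
    if r ≤ k then (List.range (n+1)).map (pvL w1 w2 r) else List.replicate (n+1) 0)

def pvMid (w1 w2 : List Char) (n m i j : Nat) : List (List Int) :=
  (List.range (m+1)).map (fun r =>
    if r ≤ i then (List.range (n+1)).map (pvL w1 w2 r)
    else if r = i+1 then (List.range (n+1)).map (fun c => if c ≤ j then pvL w1 w2 (i+1) c else 0)
    else List.replicate (n+1) 0)

theorem pvMid_zero (w1 w2 : List Char) (n m i : Nat) :
    pvMid w1 w2 n m i 0 = pvTab w1 w2 n m i := by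
  unfold pvMid pvTab
  apply pvMap_range_congr; intro r _
  by_cases h1 : r ≤ i
  · simp [h1]
  · simp only [if_neg h1]
    by_cases h2 : r = i+1
    · simp only [if_pos h2]
      rw [← pvRep (n+1) (0:Int)]
      apply pvMap_range_congr; intro c _
      rcases Nat.eq_zero_or_pos c with rfl|hc
      · simp [pvL_zero_right]
      · simp; omega
    · simp [h2]

theorem pvMid_last (w1 w2 : List Char) (n m i : Nat) :
    pvMid w1 w2 n m i n = pvTab w1 w2 n m (i+1) := by
  unfold pvMid pvTab
  apply pvMap_range_congr; intro r _
  by_cases h1 : r ≤ i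
  · simp [h1, Nat.le_succ_of_le h1]
  · simp only [if_neg h1]
    by_cases h2 : r = i+1
    · subst h2
      simp only [le_refl, if_pos]
      apply pvMap_range_congr; intro c hc
      simp [Nat.lt_succ_iff.mp hc]
    · have : ¬ r ≤ i+1 := by omega
      simp [h2, this]

theorem pvStepA_mid (w1 w2 : List Char) (n m i j : Nat) (hi : i < m) (hj : j < n) :
    pvStepA w1 w2 (pvMid w1 w2 n m i j) (i, j) = pvMid w1 w2 n m i (j+1) := by
  have him : i < m+1 := by omega
  have hi1m : i+1 < m+1 := by omega
  have hjn : j < n+1 := by omega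
  have hj1n : j+1 < n+1 := by omega
  have hrow_i : (pvMid w1 w2 n m i j).getD i [] = (List.range (n+1)).map (pvL w1 w2 i) := by
    unfold pvMid; rw [pvGetD_map_range]; simp [him]
  have hrow_i1 : (pvMid w1 w2 n m i j).getD (i+1) []
      = (List.range (n+1)).map (fun c => if c ≤ j then pvL w1 w2 (i+1) c else 0) := by
    unfold pvMid; rw [pvGetD_map_range]
    have : ¬ i+1 ≤ i := by omega
    simp [hi1m, this]
  have hg1 : pvGet2 (pvMid w1 w2 n m i j) i (j+1) = pvL w1 w2 i (j+1) := by
    unfold pvGet2; rw [hrow_i, pvGetD_map_range]; simp [hj1n]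
  have hg2 : pvGet2 (pvMid w1 w2 n m i j) (i+1) j = pvL w1 w2 (i+1) j := by
    unfold pvGet2; rw [hrow_i1, pvGetD_map_range]; simp [hjn]
  have hg3 : pvGet2 (pvMid w1 w2 n m i j) i j = pvL w1 w2 i j := by
    unfold pvGet2; rw [hrow_i, pvGetD_map_range]; simp [hjn]
  unfold pvStepA
  simp only [hg1, hg2, hg3, hrow_i1]
  rw [pvSet_map_range _ _ _ _ hj1n]
  have hnewrow : (List.range (n+1)).map (fun c => if c = j+1 then
        max (pvL w1 w2 i (j+1)) (max (pvL w1 w2 (i+1) j)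
          (pvL w1 w2 i j + (if w1.getD i ' ' = w2.getD j ' ' then (1:Int) else 0)))
      else if c ≤ j then pvL w1 w2 (i+1) c else 0)
      = (List.range (n+1)).map (fun c => if c ≤ j+1 then pvL w1 w2 (i+1) c else 0) := by
    apply pvMap_range_congr; intro c _
    by_cases hc : c = j+1
    · subst hc
      rw [if_pos rfl, if_pos (le_refl _)]
      exact (pvL_succ_succ w1 w2 i j).symm
    · by_cases hc2 : c ≤ j
      · have : c ≤ j+1 := by omega
        simp [hc, hc2, this]
      · have : ¬ c ≤ j+1 := by omega
        simp [hc, hc2, this]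
  rw [hnewrow]
  unfold pvMid
  rw [pvSet_map_range _ _ _ _ hi1m]
  apply pvMap_range_congr; intro r _
  by_cases h2 : r = i+1
  · subst h2
    have : ¬ i+1 ≤ i := by omega
    simp [this]
  · by_cases h1 : r ≤ i <;> simp [h1, h2]

theorem pvInner_fold_A (w1 w2 : List Char) (n m i : Nat) (hi : i < m) :
    ∀ j, j ≤ n →
      (List.range j).foldl (fun dp jj => pvStepA w1 w2 dp (i, jj)) (pvMid w1 w2 n m i 0)
        = pvMid w1 w2 n m i j := by
  intro j
  induction j with
  | zero => intro _; simp
  | succ j ih =>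
    intro hj
    rw [show List.range (j+1) = List.range j ++ [j] from List.range_succ,
      List.foldl_append, ih (by omega)]
    simpa using pvStepA_mid w1 w2 n m i j hi (by omega)

theorem pvOuter_fold_A (w1 w2 : List Char) (n m : Nat) :
    ∀ k, k ≤ m →
      (List.range k).foldl
        (fun dp i => ((List.range n).map (fun j => (i, j))).foldl (pvStepA w1 w2) dp)
        (pvTab w1 w2 n m 0)
      = pvTab w1 w2 n m k := by
  intro k
  induction k with
  | zero => intro _; simp
  | succ k ih =>
    intro hk
    rw [show List.range (k+1) = List.range k ++ [k] from List.range_succ,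
      List.foldl_append, ih (by omega)]
    simp only [List.foldl_cons, List.foldl_nil, List.foldl_map]
    rw [← pvMid_zero w1 w2 n m k, pvInner_fold_A w1 w2 n m k (by omega) n (le_refl n),
      pvMid_last]

theorem pvTab_zero (w1 w2 : List Char) (n m : Nat) :
    pvTab w1 w2 n m 0 = List.replicate (m+1) (List.replicate (n+1) (0:Int)) := by
  unfold pvTab
  rw [← pvRep (m+1) (List.replicate (n+1) (0:Int))]
  apply pvMap_range_congr; intro r _
  by_cases h : r ≤ 0
  · have hr : r = 0 := by omega
    subst hr
    rw [if_pos (le_refl _), ← pvRep (n+1) (0:Int)]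
    apply pvMap_range_congr; intro c _; rw [pvL]
  · simp [h]

-- A computes m + n - 2 * pvL m n
theorem pvA_value (word1 word2 : String) :
    minDistance_2d_dp_LCS word1 word2
      = (word1.toList.length : Int) + (word2.toList.length : Int)
        - 2 * pvL word1.toList word2.toList word1.toList.length word2.toList.length := by
  simp only [minDistance_2d_dp_LCS]
  have hfold : ((List.range word1.toList.length).flatMap
        (fun i => (List.range word2.toList.length).map (fun j => (i, j)))).foldl
      (pvStepA word1.toList word2.toList)
      (List.replicate (word1.toList.length+1) (List.replicate (word2.toList.length+1) (0:Int)))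
      = pvTab word1.toList word2.toList word2.toList.length word1.toList.length
          word1.toList.length := by
    rw [List.foldl_flatMap, ← pvTab_zero word1.toList word2.toList]
    exact pvOuter_fold_A word1.toList word2.toList word2.toList.length word1.toList.length
      word1.toList.length (le_refl _)
  rw [hfold]
  have hget : pvGet2 (pvTab word1.toList word2.toList word2.toList.length word1.toList.length
        word1.toList.length) word1.toList.length word2.toList.length
      = pvL word1.toList word2.toList word1.toList.length word2.toList.length := by
    unfold pvGet2 pvTab
    rw [pvGetD_map_range]
    simp only [Nat.lt_succ_self, if_pos, le_refl]
    rw [pvGetD_map_range]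
    simp
  rw [hget]

-- B-side: the inner fold builds the row of pvM (i+1)
theorem pvInner_fold_B (w1 w2 : List Char) (n i : Nat) :
    ∀ j, j ≤ n →
      (List.range j).foldl (pvInnerB w1 w2 i ((List.range (n+1)).map (pvM w1 w2 i)))
          [((i : Int) + 1)]
        = (List.range (j+1)).map (pvM w1 w2 (i+1)) := by
  intro j
  induction j with
  | zero =>
    intro _
    simp [pvM_zero]
  | succ j ih =>
    intro hj
    rw [show List.range (j+1) = List.range j ++ [j] from List.range_succ,
      List.foldl_append, ih (by omega)]
    simp only [List.foldl_cons, List.foldl_nil]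
    unfold pvInnerB
    have hprevj : ((List.range (n+1)).map (pvM w1 w2 i)).getD j 0 = pvM w1 w2 i j := by
      rw [pvGetD_map_range]; simp; omega
    have hprevj1 : ((List.range (n+1)).map (pvM w1 w2 i)).getD (j+1) 0 = pvM w1 w2 i (j+1) := by
      rw [pvGetD_map_range]; simp; omega
    have hcurj : ((List.range (j+1)).map (pvM w1 w2 (i+1))).getD j 0 = pvM w1 w2 (i+1) j := by
      rw [pvGetD_map_range]; simp
    rw [hprevj, hprevj1, hcurj]
    have hv : (if w1.getD i ' ' = w2.getD j ' ' then pvM w1 w2 i j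
        else 1 + min (pvM w1 w2 i (j+1)) (pvM w1 w2 (i+1) j)) = pvM w1 w2 (i+1) (j+1) :=
      (pvM_rec w1 w2 i j).symm
    rw [hv, show List.range (j+1+1) = List.range (j+1) ++ [j+1] from List.range_succ,
      List.map_append]
    simp

theorem pvOuter_fold_B (w1 w2 : List Char) (n : Nat) :
    ∀ k,
      (List.range k).foldl (pvOuterB w1 w2 n)
          ((List.range (n+1)).map (fun (j : Nat) => (j : Int)))
        = (List.range (n+1)).map (pvM w1 w2 k) := by
  intro k
  induction k with
  | zero =>
    simp only [List.range_zero, List.foldl_nil]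
    apply pvMap_range_congr; intro x _; rw [pvM_zero_left]
  | succ k ih =>
    rw [show List.range (k+1) = List.range k ++ [k] from List.range_succ,
      List.foldl_append, ih]
    simp only [List.foldl_cons, List.foldl_nil]
    unfold pvOuterB
    rw [pvInner_fold_B w1 w2 n k n (le_refl n)]

theorem pvB_value (word1 word2 : String) :
    minDistance_2d_dp_LCS_alt word1 word2
      = (word1.toList.length : Int) + (word2.toList.length : Int)
        - 2 * pvL word1.toList word2.toList word1.toList.length word2.toList.length := by
  simp only [minDistance_2d_dp_LCS_alt]
  rw [pvOuter_fold_B word1.toList word2.toList word2.toList.length word1.toList.length,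
    pvGetD_map_range]
  simp [pvM]

-- ===== VERDICT (by name: the statement is the Claim_ definition above) =====
theorem minDistance_2d_dp_LCS_spec : Claim_equal_minDistance_2d_dp_LCS := by
  intro word1 word2 _
  unfold Spec_minDistance_2d_dp_LCS
  rw [pvA_value, pvB_value]
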